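-- pv_equiv track=rewrite | github.com/michaelcreality-max/OraclAI | website_builder_ai.py | _design_layout
-- ===== SOURCE A (Python) =====
-- from typing import Dict, List, Any, Optional, Tuple
--
-- def _design_layout(query: str) -> Dict:
--     """Determine optimal layout"""
--     if any(w in query for w in ['portfolio', 'gallery', 'showcase']):
--         return {'type': 'grid-based', 'pattern': 'masonry or cards'}
--     elif any(w in query for w in ['blog', 'content', 'articles']):
--         return {'type': 'content-focused', 'pattern': 'single column with sidebar'}
--     elif any(w in query for w in ['landing', 'marketing', 'promo']):
--         return {'type': 'conversion-focused', 'pattern': 'scrolling sections'}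
--     elif any(w in query for w in ['dashboard', 'app', 'admin']):
--         return {'type': 'app-like', 'pattern': 'sidebar + main content'}
--     else:
--         return {'type': 'balanced', 'pattern': 'flexible multi-section'}
-- ===== SOURCE B (Python) =====
-- _KW = {'portfolio': 0, 'gallery': 0, 'showcase': 0,
--        'blog': 1, 'content': 1, 'articles': 1,
--        'landing': 2, 'marketing': 2, 'promo': 2,
--        'dashboard': 3, 'app': 3, 'admin': 3}
--
-- _RESULTS = [
--     {'type': 'grid-based', 'pattern': 'masonry or cards'},
--     {'type': 'content-focused', 'pattern': 'single column with sidebar'},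
--     {'type': 'conversion-focused', 'pattern': 'scrolling sections'},
--     {'type': 'app-like', 'pattern': 'sidebar + main content'},
--     {'type': 'balanced', 'pattern': 'flexible multi-section'},
-- ]
--
-- def _design_layout(query: str) -> dict:
--     """Determine optimal layout: best (lowest-priority-number) category any matched keyword belongs to."""
--     cat = min((c for w, c in _KW.items() if w in query), default=4)
--     return dict(_RESULTS[cat])
-- ===== Notes on version B (the rewrite author's own statement) =====
-- stated objective: alternative
-- what changed: Replaces the if/elif chain of any()-tests with a keyword->category-priority dict scanned once, taking the minimum matched category number and indexing a results table (first-match branch order becomes min over priorities).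
import Mathlib
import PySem

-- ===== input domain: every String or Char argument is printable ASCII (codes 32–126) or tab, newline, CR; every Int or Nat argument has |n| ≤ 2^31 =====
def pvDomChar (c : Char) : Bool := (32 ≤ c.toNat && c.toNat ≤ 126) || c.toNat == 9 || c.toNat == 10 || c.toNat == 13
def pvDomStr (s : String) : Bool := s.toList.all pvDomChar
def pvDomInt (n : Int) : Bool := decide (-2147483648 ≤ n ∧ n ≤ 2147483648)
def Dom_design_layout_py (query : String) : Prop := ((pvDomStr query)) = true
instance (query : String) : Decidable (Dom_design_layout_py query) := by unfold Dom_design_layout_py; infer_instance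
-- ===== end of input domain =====

-- B replaces A's if/elif chain by a keyword->priority table: min matched priority indexes a results table (alternative decomposition, same cost).

-- ===== PORT A =====
def design_layout_py (query : String) : List (String × String) :=
  if ["portfolio", "gallery", "showcase"].any (fun w => PySem.Str.isIn w query) then
    [("type", "grid-based"), ("pattern", "masonry or cards")]
  else if ["blog", "content", "articles"].any (fun w => PySem.Str.isIn w query) then
    [("type", "content-focused"), ("pattern", "single column with sidebar")]
  else if ["landing", "marketing", "promo"].any (fun w => PySem.Str.isIn w query) then
    [("type", "conversion-focused"), ("pattern", "scrolling sections")]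
  else if ["dashboard", "app", "admin"].any (fun w => PySem.Str.isIn w query) then
    [("type", "app-like"), ("pattern", "sidebar + main content")]
  else
    [("type", "balanced"), ("pattern", "flexible multi-section")]

-- ===== PORT B =====
def pvKW : List (String × Nat) :=
  [("portfolio", 0), ("gallery", 0), ("showcase", 0),
   ("blog", 1), ("content", 1), ("articles", 1),
   ("landing", 2), ("marketing", 2), ("promo", 2),
   ("dashboard", 3), ("app", 3), ("admin", 3)]

def pvRESULTS : List (List (String × String)) :=
  [[("type", "grid-based"), ("pattern", "masonry or cards")],
   [("type", "content-focused"), ("pattern", "single column with sidebar")],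
   [("type", "conversion-focused"), ("pattern", "scrolling sections")],
   [("type", "app-like"), ("pattern", "sidebar + main content")],
   [("type", "balanced"), ("pattern", "flexible multi-section")]]

def design_layout_py_alt (query : String) : List (String × String) :=
  let cat : Nat :=
    ((PySem.List.min? ((pvKW.filter (fun p => PySem.Str.isIn p.1 query)).map Prod.snd) (fun c => c)).getD 4)
  pvRESULTS.getD cat []

-- ===== PRECONDITION & SPEC =====
def Spec_design_layout_py (query : String) (out : List (String × String)) : Prop := out = design_layout_py_alt query
instance (query : String) (out : List (String × String)) : Decidable (Spec_design_layout_py query out) := by unfold Spec_design_layout_py; infer_instance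

-- ===== CLAIM (what is proved, stated in full; the proofs are below) =====
def Claim_equal_design_layout_py : Prop := ∀ (query : String), Dom_design_layout_py query → Spec_design_layout_py query (design_layout_py query)

-- ===== LEMMAS AND PROOFS =====

-- The min of a list that contains i and whose elements are all ≥ i is i.
theorem pv_min_getD (l : List Nat) (i : Nat) (hmem : i ∈ l) (hlb : ∀ y ∈ l, i ≤ y) :
    (PySem.List.min? l (fun c => c)).getD 4 = i := by
  cases h : PySem.List.min? l (fun c => c) with
  | none =>
      rw [PySem.List.min?_eq_none_iff] at h
      simp [h] at hmem
  | some m =>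
      have h1 : m ≤ i := PySem.List.min?_isMin h i hmem
      have h2 : i ≤ m := hlb m (PySem.List.min?_mem h)
      simp; omega

-- ===== VERDICT (by name: the statement is the Claim_ definition above) =====
theorem design_layout_py_spec : Claim_equal_design_layout_py := by
  intro q _
  unfold Spec_design_layout_py design_layout_py design_layout_py_alt
  by_cases B0 : ["portfolio", "gallery", "showcase"].any (fun w => PySem.Str.isIn w q) = true
  · rw [if_pos B0]
    have hmem : (0 : Nat) ∈ (pvKW.filter (fun p => PySem.Str.isIn p.1 q)).map Prod.snd := by
      simp [pvKW]; simp at B0; tauto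
    rw [pv_min_getD _ 0 hmem (fun y _ => Nat.zero_le y)]
    rfl
  · rw [if_neg B0]
    simp at B0
    obtain ⟨n1, n2, n3⟩ := B0
    by_cases B1 : ["blog", "content", "articles"].any (fun w => PySem.Str.isIn w q) = true
    · rw [if_pos B1]
      have hmem : (1 : Nat) ∈ (pvKW.filter (fun p => PySem.Str.isIn p.1 q)).map Prod.snd := by
        simp [pvKW]; simp at B1; tauto
      have hlb : ∀ y ∈ (pvKW.filter (fun p => PySem.Str.isIn p.1 q)).map Prod.snd, 1 ≤ y := by
        intro y hy
        simp [pvKW, n1, n2, n3] at hy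
        omega
      rw [pv_min_getD _ 1 hmem hlb]
      rfl
    · rw [if_neg B1]
      simp at B1
      obtain ⟨n4, n5, n6⟩ := B1
      by_cases B2 : ["landing", "marketing", "promo"].any (fun w => PySem.Str.isIn w q) = true
      · rw [if_pos B2]
        have hmem : (2 : Nat) ∈ (pvKW.filter (fun p => PySem.Str.isIn p.1 q)).map Prod.snd := by
          simp [pvKW]; simp at B2; tauto
        have hlb : ∀ y ∈ (pvKW.filter (fun p => PySem.Str.isIn p.1 q)).map Prod.snd, 2 ≤ y := by
          intro y hy
          simp [pvKW, n1, n2, n3, n4, n5, n6] at hy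
          omega
        rw [pv_min_getD _ 2 hmem hlb]
        rfl
      · rw [if_neg B2]
        simp at B2
        obtain ⟨n7, n8, n9⟩ := B2
        by_cases B3 : ["dashboard", "app", "admin"].any (fun w => PySem.Str.isIn w q) = true
        · rw [if_pos B3]
          have hmem : (3 : Nat) ∈ (pvKW.filter (fun p => PySem.Str.isIn p.1 q)).map Prod.snd := by
            simp [pvKW]; simp at B3; tauto
          have hlb : ∀ y ∈ (pvKW.filter (fun p => PySem.Str.isIn p.1 q)).map Prod.snd, 3 ≤ y := by
            intro y hy
            simp [pvKW, n1, n2, n3, n4, n5, n6, n7, n8, n9] at hy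
            omega
          rw [pv_min_getD _ 3 hmem hlb]
          rfl
        · rw [if_neg B3]
          simp at B3
          obtain ⟨n10, n11, n12⟩ := B3
          have hnil : pvKW.filter (fun p => PySem.Str.isIn p.1 q) = [] := by
            simp [pvKW, n1, n2, n3, n4, n5, n6, n7, n8, n9, n10, n11, n12]
          rw [hnil]
          rfl
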